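-- pv_equiv track=rewrite | github.com/gitGNU/gnu_pretest | server/pretest-server.py | filter_test_suite_log
-- ===== SOURCE A (Python) =====
-- def filter_test_suite_log(lines):
--     # The first 11 lines are (always?) the same:
--     #   ================================================
--     #   GNU coreutils 8.24: ./tests/test-suite.log
--     #   ================================================
--     #
--     #   # TOTAL: 579
--     #   # PASS:  432
--     #   # SKIP:  147
--     #   # XFAIL: 0
--     #   # FAIL:  0
--     #   # XPASS: 0
--     #   # ERROR: 0
--     header = lines[:11]
--
--     l = header
--
--     # Iterate the rest of the lines, extract "FAIL" data
--     in_fail=False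
--     for i in lines:
--          new_good_test = i.startswith("SKIP:") or i.startswith("PASS:") or i.startswith("XFAIL:") or i.startswith("XPASS")
--          new_bad_test  = i.startswith("FAIL:") or i.startswith("ERROR:")
--          if in_fail and new_good_test:
--             in_fail = False
--          if not in_fail and new_bad_test:
--             in_fail = True
--          if in_fail:
--             l.append(i)
--     return l
-- ===== SOURCE B (Python) =====
-- def filter_test_suite_log(lines):
--     # Right-to-left grouping pass: split the log into (is_bad, region) groups,
--     # one per marker line (region lines gathered in reverse while scanning);
--     # then emit a copy of the 11-line header followed by the bad regions.
--     pre, regs = [], []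
--     for x in reversed(lines):
--         pre.append(x)
--         if x.startswith(("FAIL:", "ERROR:")):
--             regs.append((True, pre[::-1]))
--             pre = []
--         elif x.startswith(("SKIP:", "PASS:", "XFAIL:", "XPASS")):
--             regs.append((False, pre[::-1]))
--             pre = []
--     regs.reverse()
--     out = lines[:11]
--     for is_bad, reg in regs:
--         if is_bad:
--             out += reg
--     return out
-- ===== Notes on version B (the rewrite author's own statement) =====
-- stated objective: alternative
-- what changed: Replaces A's single forward pass with a running in_fail toggle by a right-to-left grouping pass that builds explicit (is_bad, region) groups at each marker line, then emits the header copy followed by the bad regions.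
import Mathlib
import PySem

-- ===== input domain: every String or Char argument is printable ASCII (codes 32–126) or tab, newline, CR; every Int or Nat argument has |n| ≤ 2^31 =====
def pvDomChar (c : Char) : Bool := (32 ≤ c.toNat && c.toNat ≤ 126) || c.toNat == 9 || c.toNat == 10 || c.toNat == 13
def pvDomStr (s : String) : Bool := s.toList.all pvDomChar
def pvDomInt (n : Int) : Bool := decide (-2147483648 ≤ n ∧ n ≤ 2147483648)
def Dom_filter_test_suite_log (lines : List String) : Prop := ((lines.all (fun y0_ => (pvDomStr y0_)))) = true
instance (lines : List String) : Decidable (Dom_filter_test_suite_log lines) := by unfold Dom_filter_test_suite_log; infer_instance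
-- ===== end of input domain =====

-- B replaces A's single toggle-state pass by a right-to-left grouping into marker regions
-- followed by emitting the bad regions (objective: alternative decomposition, same cost).

-- ===== PORT A =====
def filter_test_suite_log (lines : List String) : List String :=
  -- header = lines[:11]  (nonnegative literal bound: take 11)
  let header := lines.take 11
  -- l = header (a copy via the slice); in_fail = False; for i in lines: ...
  let r := lines.foldl (fun (st : Bool × List String) i =>
      let in_fail := st.1
      let l := st.2
      let new_good_test := PySem.Str.startswith i "SKIP:" || PySem.Str.startswith i "PASS:"
        || PySem.Str.startswith i "XFAIL:" || PySem.Str.startswith i "XPASS"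
      let new_bad_test := PySem.Str.startswith i "FAIL:" || PySem.Str.startswith i "ERROR:"
      let in_fail := if in_fail && new_good_test then false else in_fail
      let in_fail := if !in_fail && new_bad_test then true else in_fail
      let l := if in_fail then l ++ [i] else l
      (in_fail, l)) (false, header)
  r.2

-- ===== PORT B =====
-- x.startswith(("FAIL:", "ERROR:"))
def pvIsBad (x : String) : Bool :=
  PySem.Str.startswith x "FAIL:" || PySem.Str.startswith x "ERROR:"
-- x.startswith(("SKIP:", "PASS:", "XFAIL:", "XPASS"))
def pvIsGood (x : String) : Bool :=
  PySem.Str.startswith x "SKIP:" || PySem.Str.startswith x "PASS:"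
    || PySem.Str.startswith x "XFAIL:" || PySem.Str.startswith x "XPASS"

def filter_test_suite_log_alt (lines : List String) : List String :=
  -- for x in reversed(lines): build (pre, regs); regs is appended at the back, reversed after
  let st := lines.reverse.foldl (fun (st : List String × List (Bool × List String)) x =>
      let pre := st.1 ++ [x]
      if pvIsBad x then ([], st.2 ++ [(true, pre.reverse)])
      else if pvIsGood x then ([], st.2 ++ [(false, pre.reverse)])
      else (pre, st.2)) ([], [])
  let regs := st.2.reverse
  -- out = lines[:11]; for is_bad, reg in regs: if is_bad: out += reg
  regs.foldl (fun out r => if r.1 then out ++ r.2 else out) (lines.take 11)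

-- ===== PRECONDITION & SPEC =====
def Spec_filter_test_suite_log (lines : List String) (out : List String) : Prop := out = filter_test_suite_log_alt lines
instance (lines : List String) (out : List String) : Decidable (Spec_filter_test_suite_log lines out) := by unfold Spec_filter_test_suite_log; infer_instance

-- ===== CLAIM (what is proved, stated in full; the proofs are below) =====
def Claim_equal_filter_test_suite_log : Prop := ∀ (lines : List String), Dom_filter_test_suite_log lines → Spec_filter_test_suite_log lines (filter_test_suite_log lines)

-- ===== LEMMAS AND PROOFS =====

-- the in_fail state after processing one line (A's two ifs collapse to this)
def pvStep (inf : Bool) (i : String) : Bool :=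
  if pvIsBad i then true else if pvIsGood i then false else inf

lemma pvStepA_eq (inf : Bool) (i : String) :
    (if !(if inf && pvIsGood i then false else inf) && pvIsBad i then true
     else (if inf && pvIsGood i then false else inf)) = pvStep inf i := by
  cases hb : pvIsBad i <;> cases hg : pvIsGood i <;> cases inf <;> simp [pvStep, hb, hg]

-- the lines A's loop appends, as a structural recursion
def pvSegs : List String → Bool → List String
  | [], _ => []
  | i :: xs, inf =>
    let inf' := pvStep inf i
    (if inf' then [i] else []) ++ pvSegs xs inf'

lemma loopA_eq (xs : List String) : ∀ (inf : Bool) (acc : List String),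
    (xs.foldl (fun (st : Bool × List String) i =>
      let in_fail := st.1
      let l := st.2
      let new_good_test := PySem.Str.startswith i "SKIP:" || PySem.Str.startswith i "PASS:"
        || PySem.Str.startswith i "XFAIL:" || PySem.Str.startswith i "XPASS"
      let new_bad_test := PySem.Str.startswith i "FAIL:" || PySem.Str.startswith i "ERROR:"
      let in_fail := if in_fail && new_good_test then false else in_fail
      let in_fail := if !in_fail && new_bad_test then true else in_fail
      let l := if in_fail then l ++ [i] else l
      (in_fail, l)) (inf, acc)).2 = acc ++ pvSegs xs inf := by
  induction xs with
  | nil => intro inf acc; simp [pvSegs]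
  | cons x xs ih =>
    intro inf acc
    simp only [List.foldl_cons]
    have h := pvStepA_eq inf x
    simp only [pvIsGood, pvIsBad] at h
    rw [show (if inf && (PySem.Str.startswith x "SKIP:" || PySem.Str.startswith x "PASS:"
        || PySem.Str.startswith x "XFAIL:" || PySem.Str.startswith x "XPASS") then false else inf)
        = (if inf && pvIsGood x then false else inf) from by simp [pvIsGood]]
    rw [show (PySem.Str.startswith x "FAIL:" || PySem.Str.startswith x "ERROR:") = pvIsBad x from by
      simp [pvIsBad]]
    rw [pvStepA_eq inf x, ih]
    simp [pvSegs]
    cases pvStep inf x <;> simp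

lemma A_char (lines : List String) :
    filter_test_suite_log lines = lines.take 11 ++ pvSegs lines false := by
  unfold filter_test_suite_log
  exact loopA_eq lines false (lines.take 11)

-- B's grouping, as a structural recursion: (lines before the first marker, regions)
def pvSplit : List String → List String × List (Bool × List String)
  | [] => ([], [])
  | x :: xs =>
    let p := pvSplit xs
    if pvIsBad x then ([], (true, x :: p.1) :: p.2)
    else if pvIsGood x then ([], (false, x :: p.1) :: p.2)
    else (x :: p.1, p.2)

lemma foldB_eq (xs : List String) :
    (xs.reverse.foldl (fun (st : List String × List (Bool × List String)) x =>
      let pre := st.1 ++ [x]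
      if pvIsBad x then ([], st.2 ++ [(true, pre.reverse)])
      else if pvIsGood x then ([], st.2 ++ [(false, pre.reverse)])
      else (pre, st.2)) ([], []))
    = ((pvSplit xs).1.reverse, (pvSplit xs).2.reverse) := by
  rw [List.foldl_reverse]
  induction xs with
  | nil => simp [pvSplit]
  | cons x xs ih =>
    simp only [List.foldr_cons, ih, pvSplit]
    cases hb : pvIsBad x <;> cases hg : pvIsGood x <;> simp

lemma outFold_eq (regs : List (Bool × List String)) (acc : List String) :
    regs.foldl (fun out r => if r.1 then out ++ r.2 else out) acc
    = acc ++ (regs.filter (·.1)).flatMap (·.2) := by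
  induction regs generalizing acc with
  | nil => simp
  | cons r rs ih =>
    cases hb : r.1 <;> simp [List.foldl_cons, hb, ih, List.append_assoc]

lemma B_char (lines : List String) :
    filter_test_suite_log_alt lines
    = lines.take 11 ++ (((pvSplit lines).2.filter (·.1)).flatMap (·.2)) := by
  unfold filter_test_suite_log_alt
  rw [foldB_eq, outFold_eq]
  simp

lemma segs_split (xs : List String) : ∀ inf : Bool,
    pvSegs xs inf
    = (if inf then (pvSplit xs).1 else []) ++ (((pvSplit xs).2.filter (·.1)).flatMap (·.2)) := by
  induction xs with
  | nil => intro inf; cases inf <;> simp [pvSegs, pvSplit]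
  | cons x xs ih =>
    intro inf
    cases hb : pvIsBad x <;> cases hg : pvIsGood x <;> cases inf <;>
      simp [pvSegs, pvSplit, pvStep, hb, hg, ih, List.append_assoc]

-- ===== VERDICT (by name: the statement is the Claim_ definition above) =====
theorem filter_test_suite_log_spec : Claim_equal_filter_test_suite_log := by
  intro lines _
  show filter_test_suite_log lines = filter_test_suite_log_alt lines
  rw [A_char, B_char, segs_split lines false]
  simp
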